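-- pv_equiv track=rewrite | github.com/heymrun/heym | backend/app/services/skill_python_executor.py | _find_entry_point
-- ===== SOURCE A (Python) =====
-- from typing import Any
--
-- ENTRY_POINT_PRIORITY = ("main.py", "run.py")
--
-- def _find_entry_point(files: list[dict[str, Any]]) -> str | None:
--     """Return the best entry point path from skill files, or None if no .py files."""
--     py_files = [f["path"] for f in files if f.get("path", "").endswith(".py")]
--     if not py_files:
--         return None
--     for preferred in ENTRY_POINT_PRIORITY:
--         for p in py_files:
--             if p.endswith("/" + preferred) or p == preferred:
--                 return p
--     return py_files[0]
-- ===== SOURCE B (Python) =====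
-- ENTRY_POINT_PRIORITY = ("main.py", "run.py")
--
--
-- def _find_entry_point(files):
--     """Return the best entry point path from skill files, or None if no .py files."""
--     py_files = [f["path"] for f in files if f.get("path", "").endswith(".py")]
--     if not py_files:
--         return None
--
--     def rank(p):
--         if p.endswith("/main.py") or p == "main.py":
--             return 0
--         if p.endswith("/run.py") or p == "run.py":
--             return 1
--         return 2
--
--     return min(py_files, key=rank)
-- ===== Notes on version B (the rewrite author's own statement) =====
-- stated objective: simpler
-- what changed: Replaces the nested priority-over-files early-return loops with a single key-based selection: each path gets a rank (0 for main.py, 1 for run.py, 2 otherwise) and min(py_files, key=rank) picks the first path of minimal rank.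
import Mathlib
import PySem

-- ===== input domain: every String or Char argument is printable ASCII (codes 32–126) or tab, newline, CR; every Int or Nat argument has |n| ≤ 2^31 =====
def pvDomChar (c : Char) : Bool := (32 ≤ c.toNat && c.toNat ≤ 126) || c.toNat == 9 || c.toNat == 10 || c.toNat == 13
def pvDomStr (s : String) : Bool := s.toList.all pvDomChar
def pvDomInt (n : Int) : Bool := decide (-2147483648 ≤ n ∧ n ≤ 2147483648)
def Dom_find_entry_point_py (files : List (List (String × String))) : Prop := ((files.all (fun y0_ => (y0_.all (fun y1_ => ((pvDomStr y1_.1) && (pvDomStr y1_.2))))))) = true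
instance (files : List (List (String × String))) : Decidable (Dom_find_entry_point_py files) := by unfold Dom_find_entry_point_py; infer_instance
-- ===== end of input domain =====

-- B replaces A's nested priority-over-files early-return loops with a single
-- min-by-rank selection pass (objective: simpler).

-- ===== PORT A =====
-- p.endswith("/" + preferred) or p == preferred
def pvMatchA (preferred p : String) : Bool :=
  PySem.Str.endswith p ("/" ++ preferred) || p == preferred

def find_entry_point_py (files : List (List (String × String))) : Option String :=
  -- py_files = [f["path"] for f in files if f.get("path", "").endswith(".py")]
  -- (the guard guarantees the key "path" is present, so f["path"] = getD f "path" "" exactly)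
  let py_files : List String :=
    (files.filter (fun f =>
        PySem.Str.endswith (PySem.Dict.getD ⟨f⟩ "path" "") ".py")).map
      (fun f => PySem.Dict.getD ⟨f⟩ "path" "")
  if py_files.isEmpty then none
  else
    -- for preferred in ENTRY_POINT_PRIORITY: for p in py_files: if match: return p
    match (["main.py", "run.py"].findSome?
        (fun preferred => py_files.find? (fun p => pvMatchA preferred p))) with
    | some p => some p
    | none => py_files.head?   -- py_files[0]; py_files is nonempty in this branch

-- ===== PORT B =====
def pvRank (p : String) : Nat :=
  if PySem.Str.endswith p "/main.py" || p == "main.py" then 0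
  else if PySem.Str.endswith p "/run.py" || p == "run.py" then 1
  else 2

def find_entry_point_py_alt (files : List (List (String × String))) : Option String :=
  let py_files : List String :=
    (files.filter (fun f =>
        PySem.Str.endswith (PySem.Dict.getD ⟨f⟩ "path" "") ".py")).map
      (fun f => PySem.Dict.getD ⟨f⟩ "path" "")
  if py_files.isEmpty then none
  else PySem.List.min? py_files pvRank

-- ===== PRECONDITION & SPEC =====
def Spec_find_entry_point_py (files : List (List (String × String))) (out : Option String) : Prop := out = find_entry_point_py_alt files
instance (files : List (List (String × String))) (out : Option String) : Decidable (Spec_find_entry_point_py files out) := by unfold Spec_find_entry_point_py; infer_instance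

-- ===== CLAIM (what is proved, stated in full; the proofs are below) =====
def Claim_equal_find_entry_point_py : Prop := ∀ (files : List (List (String × String))), Dom_find_entry_point_py files → Spec_find_entry_point_py files (find_entry_point_py files)

-- ===== LEMMAS AND PROOFS =====

-- the fold that PySem.List.min? performs
def pvStep (acc : Option String) (x : String) : Option String :=
  match acc with
  | none => some x
  | some m => if pvRank x < pvRank m then some x else some m

theorem pvMin?_eq_foldl (l : List String) :
    PySem.List.min? l pvRank = l.foldl pvStep none := by
  unfold PySem.List.min?
  congr 1
  funext acc x
  cases acc <;> rfl

def pvM0 (p : String) : Bool := PySem.Str.endswith p "/main.py" || p == "main.py"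
def pvM1 (p : String) : Bool := PySem.Str.endswith p "/run.py" || p == "run.py"

theorem pvRank_eq (p : String) :
    pvRank p = if pvM0 p then 0 else if pvM1 p then 1 else 2 := rfl

-- a rank-0 accumulator is never displaced
theorem pvFold_rank0 (m : String) (h : pvRank m = 0) :
    ∀ l : List String, l.foldl pvStep (some m) = some m := by
  intro l
  induction l with
  | nil => rfl
  | cons x t ih =>
      have : pvStep (some m) x = some m := by
        simp [pvStep, h]
      simp [List.foldl_cons, this, ih]

-- from a rank-1 accumulator, the fold returns the first pvM0 element, else the accumulator
theorem pvFold_rank1 (m : String) (h : pvRank m = 1) (l : List String) :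
    l.foldl pvStep (some m) =
      match l.find? pvM0 with
      | some p => some p
      | none => some m := by
  induction l generalizing m with
  | nil => rfl
  | cons x t ih =>
      by_cases h0 : pvM0 x
      · have hr0 : pvRank x = 0 := by simp [pvRank_eq, h0]
        have hstep : pvStep (some m) x = some x := by
          simp [pvStep, hr0, h]
        simp [List.foldl_cons, hstep, h0, pvFold_rank0 x hr0 t]
      · have hstep : pvStep (some m) x = some m := by
          have : ¬ pvRank x < pvRank m := by
            rw [pvRank_eq, h]; simp [h0]; split <;> omega
          simp [pvStep, this]
        simp [List.foldl_cons, hstep, h0, ih m h]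

-- from a rank-2 accumulator, the fold returns the first pvM0 element, else the
-- first pvM1 element, else the accumulator
theorem pvFold_rank2 (m : String) (h : pvRank m = 2) (l : List String) :
    l.foldl pvStep (some m) =
      match l.find? pvM0 with
      | some p => some p
      | none =>
        match l.find? pvM1 with
        | some q => some q
        | none => some m := by
  induction l generalizing m with
  | nil => rfl
  | cons x t ih =>
      by_cases h0 : pvM0 x
      · have hr0 : pvRank x = 0 := by simp [pvRank_eq, h0]
        have hstep : pvStep (some m) x = some x := by
          simp [pvStep, hr0, h]
        simp [List.foldl_cons, hstep, h0, pvFold_rank0 x hr0 t]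
      · by_cases h1 : pvM1 x
        · have hr1 : pvRank x = 1 := by simp [pvRank_eq, h0, h1]
          have hstep : pvStep (some m) x = some x := by
            simp [pvStep, hr1, h]
          simp [List.foldl_cons, hstep, h0, h1, pvFold_rank1 x hr1 t]
        · have hr2 : pvRank x = 2 := by simp [pvRank_eq, h0, h1]
          have hstep : pvStep (some m) x = some m := by
            simp [pvStep, hr2, h]
          simp [List.foldl_cons, hstep, h0, h1, ih m h]

-- the core equality on a nonempty path list
theorem pvCore (x : String) (t : List String) :
    (match (["main.py", "run.py"].findSome?
        (fun preferred => (x :: t).find? (fun p => pvMatchA preferred p))) with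
      | some p => some p
      | none => (x :: t).head?) = PySem.List.min? (x :: t) pvRank := by
  rw [pvMin?_eq_foldl]
  have hfold : (x :: t).foldl pvStep none = t.foldl pvStep (some x) := rfl
  rw [hfold]
  have hfs : (["main.py", "run.py"].findSome?
      (fun preferred => (x :: t).find? (fun p => pvMatchA preferred p)))
      = match (x :: t).find? pvM0 with
        | some p => some p
        | none => (x :: t).find? pvM1 := by
    simp only [List.findSome?_cons, List.findSome?_nil]
    have e0 : (fun p => pvMatchA "main.py" p) = pvM0 := rfl
    have e1 : (fun p => pvMatchA "run.py" p) = pvM1 := rfl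
    rw [e0, e1]
    cases (x :: t).find? pvM0 <;> cases (x :: t).find? pvM1 <;> rfl
  rw [hfs]
  by_cases h0 : pvM0 x
  · have hr0 : pvRank x = 0 := by simp [pvRank_eq, h0]
    simp [h0, pvFold_rank0 x hr0 t]
  · by_cases h1 : pvM1 x
    · have hr1 : pvRank x = 1 := by simp [pvRank_eq, h0, h1]
      rw [pvFold_rank1 x hr1 t]
      simp [h0, h1]
      cases t.find? pvM0 <;> rfl
    · have hr2 : pvRank x = 2 := by simp [pvRank_eq, h0, h1]
      rw [pvFold_rank2 x hr2 t]
      simp [h0, h1]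
      cases t.find? pvM0 <;> cases t.find? pvM1 <;> rfl

-- ===== VERDICT (by name: the statement is the Claim_ definition above) =====
theorem find_entry_point_py_spec : Claim_equal_find_entry_point_py := by
  intro files _
  unfold Spec_find_entry_point_py find_entry_point_py find_entry_point_py_alt
  cases hl : (files.filter (fun f =>
      PySem.Str.endswith (PySem.Dict.getD ⟨f⟩ "path" "") ".py")).map
      (fun f => PySem.Dict.getD ⟨f⟩ "path" "") with
  | nil => simp
  | cons x t =>
      simp only [List.isEmpty_cons, if_neg (by decide : ¬ (false = true))]
      exact pvCore x t
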